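-- pv_equiv track=rewrite | github.com/Windyvn2000/Duy-Manh | Bói tình duyên-Bản chính.py | boi_tinh_duyen
-- ===== SOURCE A (Python) =====
-- def boi_tinh_duyen(ten_nam, ten_nu):
--     ten_nam = ten_nam.lower()
--     ten_nu = ten_nu.lower()
--     dem = 0
--     for chu_cai in range(ord('a'), ord('z') + 1):
--         if chr(chu_cai) in ten_nam and chr(chu_cai) in ten_nu:
--             dem += 1
--     if dem == 0:
--         ket_qua = "nguoi dung nuoc la"
--     elif dem < 5:
--         ket_qua = "em chi xem anh la thang ban than"
--     else:
--         ket_qua = "I love you"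
--     return ket_qua
-- ===== SOURCE B (Python) =====
-- def boi_tinh_duyen(ten_nam, ten_nu):
--     xs = sorted(set(ten_nam.lower()))
--     ys = sorted(set(ten_nu.lower()))
--     i = j = dem = 0
--     while i < len(xs) and j < len(ys):
--         if xs[i] < ys[j]:
--             i += 1
--         elif ys[j] < xs[i]:
--             j += 1
--         else:
--             if 'a' <= xs[i] <= 'z':
--                 dem += 1
--             i += 1
--             j += 1
--     if dem == 0:
--         return "nguoi dung nuoc la"
--     if dem < 5:
--         return "em chi xem anh la thang ban than"
--     return "I love you"
-- ===== Notes on version B (the rewrite author's own statement) =====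
-- stated objective: alternative
-- what changed: Replaces A's fixed 26-letter alphabet scan with repeated substring membership tests by sorting the distinct characters of each lowercased name and counting common a-z letters with a two-pointer sorted-merge intersection.
import Mathlib
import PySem

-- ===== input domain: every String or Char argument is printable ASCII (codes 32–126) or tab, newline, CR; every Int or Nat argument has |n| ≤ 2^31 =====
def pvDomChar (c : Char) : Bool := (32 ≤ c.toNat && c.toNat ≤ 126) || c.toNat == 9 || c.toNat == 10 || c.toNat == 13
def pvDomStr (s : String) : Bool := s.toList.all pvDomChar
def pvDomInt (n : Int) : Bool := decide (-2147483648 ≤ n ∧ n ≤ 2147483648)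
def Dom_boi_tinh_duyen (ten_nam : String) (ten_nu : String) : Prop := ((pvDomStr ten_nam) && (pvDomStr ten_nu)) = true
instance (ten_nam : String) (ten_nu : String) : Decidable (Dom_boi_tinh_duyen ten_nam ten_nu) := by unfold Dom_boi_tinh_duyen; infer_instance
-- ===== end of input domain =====

-- B replaces A's fixed 26-letter alphabet scan (substring test per letter) by sorting the
-- distinct characters of each lowercased name and counting common a-z letters with a
-- two-pointer sorted-merge intersection; same result, alternative algorithm.

-- ===== PORT A =====
-- chr(c) for codes 97..122 is Char.ofNat c.toNat (ASCII); 'in' on strings is PySem.Chars.isIn.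
def boi_tinh_duyen (ten_nam : String) (ten_nu : String) : String :=
  let nam := PySem.Chars.lower ten_nam.toList
  let nu := PySem.Chars.lower ten_nu.toList
  let dem : Int := (PySem.List.pyRange 97 123 1).foldl
    (fun d c =>
      if PySem.Chars.isIn [Char.ofNat c.toNat] nam && PySem.Chars.isIn [Char.ofNat c.toNat] nu
      then d + 1 else d) 0
  if dem = 0 then "nguoi dung nuoc la"
  else if dem < 5 then "em chi xem anh la thang ban than"
  else "I love you"

-- ===== PORT B =====
-- the two-pointer while loop of Source B, transcribed as recursion consuming the two sorted lists
def pvMergeCount : List Char → List Char → Int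
  | [], _ => 0
  | _ :: _, [] => 0
  | x :: xs, y :: ys =>
    if x < y then pvMergeCount xs (y :: ys)
    else if y < x then pvMergeCount (x :: xs) ys
    else (if 'a' ≤ x ∧ x ≤ 'z' then 1 else 0) + pvMergeCount xs ys

def boi_tinh_duyen_alt (ten_nam : String) (ten_nu : String) : String :=
  let xs := PySem.List.sorted (PySem.Set.ofList (PySem.Chars.lower ten_nam.toList)) (fun x => x) false
  let ys := PySem.List.sorted (PySem.Set.ofList (PySem.Chars.lower ten_nu.toList)) (fun x => x) false
  let dem : Int := pvMergeCount xs ys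
  if dem = 0 then "nguoi dung nuoc la"
  else if dem < 5 then "em chi xem anh la thang ban than"
  else "I love you"

-- ===== PRECONDITION & SPEC =====
def Spec_boi_tinh_duyen (ten_nam : String) (ten_nu : String) (out : String) : Prop := out = boi_tinh_duyen_alt ten_nam ten_nu
instance (ten_nam : String) (ten_nu : String) (out : String) : Decidable (Spec_boi_tinh_duyen ten_nam ten_nu out) := by unfold Spec_boi_tinh_duyen; infer_instance

-- ===== CLAIM =====
def Claim_equal_boi_tinh_duyen : Prop := ∀ (ten_nam : String) (ten_nu : String), Dom_boi_tinh_duyen ten_nam ten_nu → Spec_boi_tinh_duyen ten_nam ten_nu (boi_tinh_duyen ten_nam ten_nu)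

-- ===== LEMMAS AND PROOFS =====

-- A's counting loop is countP.
theorem foldl_if_count (l : List Int) (f : Int → Bool) (d : Int) :
    l.foldl (fun d c => if f c then d + 1 else d) d = d + l.countP f := by
  induction l generalizing d with
  | nil => simp
  | cons x t ih =>
    simp only [List.foldl, List.countP_cons, ih]
    by_cases h : f x
    · simp [h]; ring
    · simp [h]

-- single-character 'in' on a string is list membership
theorem isIn_singleton (a : Char) (l : List Char) :
    PySem.Chars.isIn [a] l = l.contains a := by
  by_cases h : a ∈ l
  · simp [(PySem.Chars.isIn_iff_infix _ _).mpr ((List.singleton_infix_iff a l).mpr h), h]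
  · have hinf : ¬ [a] <:+: l := fun hinf => h ((List.singleton_infix_iff a l).mp hinf)
    simp [(PySem.Chars.isIn_eq_false_iff _ _).mpr hinf, h]

-- the merge counts exactly the common elements in a-z (for strictly increasing inputs)
theorem mergeCount_eq (xs ys : List Char) (hx : xs.Pairwise (· < ·)) (hy : ys.Pairwise (· < ·)) :
    pvMergeCount xs ys
      = ((xs.filter (fun c => ys.contains c && ('a' ≤ c && c ≤ 'z'))).length : Int) := by
  induction xs, ys using pvMergeCount.induct with
  | case1 ys => simp [pvMergeCount]
  | case2 x xs => simp [pvMergeCount]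
  | case3 x xs y ys h ih =>
    -- x < y : x matches no element of y::ys
    rcases List.pairwise_cons.mp hx with ⟨hxall, hx'⟩
    rcases List.pairwise_cons.mp hy with ⟨hyall, hy'⟩
    have hnot : ¬ x ∈ y :: ys := by
      intro hm
      rcases List.mem_cons.mp hm with rfl | hm
      · exact lt_irrefl x h
      · exact lt_irrefl x (h.trans (hyall _ hm))
    have hcond : ¬((x = y ∨ x ∈ ys) ∧ 'a' ≤ x ∧ x ≤ 'z') :=
      fun hc => hnot (List.mem_cons.mpr hc.1)
    rw [pvMergeCount, if_pos h, ih hx' hy]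
    simp [hcond]
  | case4 x xs y ys h h' ih =>
    -- y < x : y matches no element of x::xs
    rcases List.pairwise_cons.mp hy with ⟨hyall, hy'⟩
    rcases List.pairwise_cons.mp hx with ⟨hxall, hx'⟩
    have hfc : ∀ c ∈ x :: xs, ((y :: ys).contains c && ('a' ≤ c && c ≤ 'z'))
        = (ys.contains c && ('a' ≤ c && c ≤ 'z')) := by
      intro c hc
      have hne : c ≠ y := by
        rintro rfl
        rcases List.mem_cons.mp hc with rfl | hm
        · exact lt_irrefl c h'
        · exact lt_irrefl c (h'.trans (hxall _ hm))
      simp [hne]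
    rw [pvMergeCount, if_neg h, if_pos h', ih hx hy', List.filter_congr hfc]
  | case5 x xs y ys h h' ih =>
    -- x = y (neither x < y nor y < x)
    have hxy : x = y := le_antisymm (not_lt.mp h') (not_lt.mp h)
    subst hxy
    rcases List.pairwise_cons.mp hx with ⟨hxall, hx'⟩
    rcases List.pairwise_cons.mp hy with ⟨hyall, hy'⟩
    have hfc : ∀ c ∈ xs, ((x :: ys).contains c && ('a' ≤ c && c ≤ 'z'))
        = (ys.contains c && ('a' ≤ c && c ≤ 'z')) := by
      intro c hc
      have hne : c ≠ x := fun hcy => lt_irrefl c (hcy ▸ hxall c hc)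
      simp [hne]
    rw [pvMergeCount, if_neg h, if_neg h', ih hx' hy']
    simp only [List.filter_cons, List.filter_congr hfc]
    by_cases hz : 'a' ≤ x ∧ x ≤ 'z'
    · simp [hz.1, hz.2]
      ring
    · have hb : ((decide ('a' ≤ x) && decide (x ≤ 'z'))) = false := by
        by_cases h1 : 'a' ≤ x <;> by_cases h2 : x ≤ 'z' <;> simp_all
      simp [hz, hb]

theorem charcode_inj : Function.Injective (fun c : Char => (c.toNat : Int)) := by
  intro a b h
  have h' : a.toNat = b.toNat := Int.natCast_inj.mp h
  calc a = Char.ofNat a.toNat := (Char.ofNat_toNat a).symm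
    _ = Char.ofNat b.toNat := by rw [h']
    _ = b := Char.ofNat_toNat b

theorem toNat_ofNat_small (n : Nat) (h : n < 55296) : (Char.ofNat n).toNat = n := by
  rw [Char.toNat_ofNat, if_pos (Or.inl h)]

theorem boi_tinh_duyen_spec : Claim_equal_boi_tinh_duyen := by
  intro ten_nam ten_nu _
  unfold Spec_boi_tinh_duyen boi_tinh_duyen boi_tinh_duyen_alt
  set nam := PySem.Chars.lower ten_nam.toList with hnam
  set nu := PySem.Chars.lower ten_nu.toList with hnu
  set xs := PySem.List.sorted (PySem.Set.ofList nam) (fun x => x) false with hxs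
  set ys := PySem.List.sorted (PySem.Set.ofList nu) (fun x => x) false with hys
  have hpx : xs.Pairwise (· < ·) := PySem.List.sorted_ofList_pairwise_lt nam
  have hpy : ys.Pairwise (· < ·) := PySem.List.sorted_ofList_pairwise_lt nu
  -- A's loop counts the letter codes 97..122 whose character is in both names
  have hA : ((PySem.List.pyRange 97 123 1).foldl
      (fun d c => if PySem.Chars.isIn [Char.ofNat c.toNat] nam &&
                     PySem.Chars.isIn [Char.ofNat c.toNat] nu then d + 1 else d) (0 : Int))
      = (((PySem.List.pyRange 97 123 1).filter
          (fun c => nam.contains (Char.ofNat c.toNat) && nu.contains (Char.ofNat c.toNat))).length : Int) := by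
    rw [foldl_if_count]
    simp only [isIn_singleton, List.countP_eq_length_filter, zero_add]
  -- B's merge counts the common a-z letters of the two sorted distinct lists
  have hB : pvMergeCount xs ys
      = ((xs.filter (fun c => ys.contains c && ('a' ≤ c && c ≤ 'z'))).length : Int) :=
    mergeCount_eq xs ys hpx hpy
  -- the filtered code list and the filtered letter list are in code-for-letter bijection
  have hperm : ((PySem.List.pyRange 97 123 1).filter
        (fun c => nam.contains (Char.ofNat c.toNat) && nu.contains (Char.ofNat c.toNat))).Perm
      ((xs.filter (fun c => ys.contains c && ('a' ≤ c && c ≤ 'z'))).map (fun c => (c.toNat : Int))) := by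
    apply (List.perm_ext_iff_of_nodup ?_ ?_).mpr
    · intro i
      simp only [List.mem_filter, List.mem_map, PySem.List.mem_pyRange_one, hxs, hys,
        PySem.List.mem_sorted, PySem.Set.mem_ofList, Bool.and_eq_true, List.contains_iff_mem,
        decide_eq_true_eq]
      constructor
      · rintro ⟨⟨h97, h123⟩, hn, hu⟩
        have hv : (Char.ofNat i.toNat).toNat = i.toNat :=
          toNat_ofNat_small i.toNat (by omega)
        refine ⟨Char.ofNat i.toNat, ⟨hn, hu, ?_, ?_⟩, ?_⟩
        · exact show (97 : Nat) ≤ (Char.ofNat i.toNat).toNat by rw [hv]; omega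
        · exact show (Char.ofNat i.toNat).toNat ≤ (122 : Nat) by rw [hv]; omega
        · rw [hv]; omega
      · rintro ⟨c, ⟨hn, hu, hca, hcz⟩, rfl⟩
        have h1 : (97 : Nat) ≤ c.toNat := hca
        have h2 : c.toNat ≤ (122 : Nat) := hcz
        have hoc : Char.ofNat ((c.toNat : Int)).toNat = c := by
          rw [Int.toNat_natCast]; exact Char.ofNat_toNat c
        exact ⟨⟨by omega, by omega⟩, by rw [hoc]; exact hn, by rw [hoc]; exact hu⟩
    · exact (PySem.List.nodup_pyRange_one 97 123).filter _
    · exact List.Nodup.map charcode_inj ((hpx.imp ne_of_lt).filter _)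
  simp only [hA, hB, hperm.length_eq, List.length_map]
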